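-- pv_equiv track=rewrite | github.com/Yamo93/machine_learning | helpers.py | str_column_to_int
-- ===== SOURCE A (Python) =====
-- def get_uniques(values):
--     '''
--     Returns a list of ordered unique values.
--     If the list of unique values is not ordered, the confusion matrix won't work.
--     The function was taken from this SO thread:
--     https://stackoverflow.com/questions/44628186/convert-python-list-to-ordered-unique-values
--     '''
--     lookup = set()  # a temporary lookup set
--     return [x for x in values if x not in lookup and lookup.add(x) is None]
--
-- def str_column_to_int(dataset, column):
--     class_values = [row[column] for row in dataset]
--     unique = get_uniques(class_values)
--     lookup = dict()
--     for i in range(len(unique)):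
--         value = unique[i]
--         lookup[value] = i
--     for row in dataset:
--         row[column] = lookup[row[column]]
--     return lookup
-- ===== SOURCE B (Python) =====
-- def str_column_to_int(dataset, column):
--     # Record each value's FIRST row index by overwriting while walking backwards,
--     # then sort the distinct values by that index and rank them.
--     first = {}
--     for i in reversed(range(len(dataset))):
--         first[dataset[i][column]] = i
--     order = sorted(first, key=first.get)
--     lookup = dict(zip(order, range(len(order))))
--     for row in dataset:
--         row[column] = lookup[row[column]]
--     return lookup
-- ===== Notes on version B (the rewrite author's own statement) =====
-- stated objective: alternative
-- what changed: Replaces A's ordered-unique membership scan plus range-indexing loop by a different algorithm: walk the rows backwards overwriting first[value]=i so each value keeps its first row index, sort the distinct values by that index, and zip them with their ranks.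
import Mathlib
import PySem

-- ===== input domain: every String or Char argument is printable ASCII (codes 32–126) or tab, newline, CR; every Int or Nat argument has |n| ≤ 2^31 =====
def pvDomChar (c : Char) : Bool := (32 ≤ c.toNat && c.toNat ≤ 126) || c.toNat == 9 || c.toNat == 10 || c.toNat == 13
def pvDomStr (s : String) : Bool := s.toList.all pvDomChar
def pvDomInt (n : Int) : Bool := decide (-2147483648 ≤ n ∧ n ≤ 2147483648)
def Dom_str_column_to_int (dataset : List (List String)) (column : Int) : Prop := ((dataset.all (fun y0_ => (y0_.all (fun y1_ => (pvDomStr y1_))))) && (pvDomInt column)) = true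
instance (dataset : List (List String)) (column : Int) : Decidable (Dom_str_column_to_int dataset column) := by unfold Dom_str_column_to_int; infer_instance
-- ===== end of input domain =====

-- B replaces A's ordered-unique membership scan + range-indexing loop by a different algorithm:
-- record each value's first row index by overwriting while walking the rows backwards, sort the
-- distinct values by that index and rank them (objective: alternative, same cost).
-- A mutates dataset in place (row[column] := label); the equivalence proved here is about the
-- RETURN value only — B performs the same mutation in Python.

-- ===== PORT A =====
-- 'lookup = set(); [x for x in values if x not in lookup and lookup.add(x) is None]'
-- ported as a fold carrying the pair (lookup set, accumulated list)
def get_uniques (values : List String) : List String :=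
  (values.foldl
    (fun (st : PySem.Set String × List String) x =>
      if st.1.contains x then st else (st.1.add x, st.2 ++ [x]))
    (PySem.Set.empty, [])).2

def str_column_to_int (dataset : List (List String)) (column : Int) : List (String × Int) :=
  -- row[column]: pyGetD; Pre_ excludes the IndexError case (some row with column out of range)
  let class_values := dataset.map (fun row => PySem.List.pyGetD row column "")
  let unique := get_uniques class_values
  let lookup : PySem.Dict String Int :=
    (PySem.List.pyRange 0 unique.length 1).foldl
      (fun d i => d.insert (PySem.List.pyGetD unique i "") i) PySem.Dict.empty
  -- second Python loop only mutates dataset (not the returned dict); no return-value effect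
  lookup.items

-- ===== PORT B =====
def str_column_to_int_alt (dataset : List (List String)) (column : Int) : List (String × Int) :=
  -- for i in reversed(range(len(dataset))): first[dataset[i][column]] = i
  let first : PySem.Dict String Int :=
    ((PySem.List.pyRange 0 (dataset.length : Int) 1).reverse).foldl
      (fun d i => d.insert (PySem.List.pyGetD (PySem.List.pyGetD dataset i []) column "") i)
      PySem.Dict.empty
  -- order = sorted(first, key=first.get); every key of first is present, so .get = getD _ 0
  let order := PySem.List.sorted first.keys (fun v => first.getD v 0)
  -- lookup = dict(zip(order, range(len(order))))
  let lookup : PySem.Dict String Int :=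
    PySem.Dict.ofList (order.zip (PySem.List.pyRange 0 (order.length : Int) 1))
  -- second Python loop only mutates dataset; no return-value effect
  lookup.items

-- ===== PRECONDITION & SPEC =====
-- Pre_ excludes exactly the inputs where row[column] raises IndexError in A (and in B).
def Pre_str_column_to_int (dataset : List (List String)) (column : Int) : Prop :=
  ∀ row ∈ dataset, PySem.Raise.InRange row.length column
instance (dataset : List (List String)) (column : Int) : Decidable (Pre_str_column_to_int dataset column) := by unfold Pre_str_column_to_int; infer_instance

def pvWitness_str_column_to_int : List (List String) × Int := ([["a"], ["b"], ["a"], ["c"]], 0)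

def Spec_str_column_to_int (dataset : List (List String)) (column : Int) (out : List (String × Int)) : Prop := out = str_column_to_int_alt dataset column
instance (dataset : List (List String)) (column : Int) (out : List (String × Int)) : Decidable (Spec_str_column_to_int dataset column out) := by unfold Spec_str_column_to_int; infer_instance

-- ===== CLAIM (what is proved, stated in full; the proofs are below) =====
def Claim_equal_str_column_to_int : Prop := ∀ (dataset : List (List String)) (column : Int), Dom_str_column_to_int dataset column → Pre_str_column_to_int dataset column → Spec_str_column_to_int dataset column (str_column_to_int dataset column)

-- ===== LEMMAS AND PROOFS =====

-- get_uniques' fold keeps its set and its list equal: it computes PySem.Set.ofList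
theorem get_uniques_fold (values : List String) (s : PySem.Set String) :
    (values.foldl
      (fun (st : PySem.Set String × List String) x =>
        if st.1.contains x then st else (st.1.add x, st.2 ++ [x]))
      (s, (s : List String))).2 = values.foldl PySem.Set.add s := by
  induction values generalizing s with
  | nil => rfl
  | cons x xs ih =>
    simp only [List.foldl_cons]
    by_cases h : s.contains x
    · rw [if_pos h]
      rw [PySem.Set.add_of_mem ((PySem.Set.contains_iff s x).mp h)]
      exact ih s
    · rw [if_neg h]
      rw [PySem.Set.add_of_not_mem (fun hm => h ((PySem.Set.contains_iff s x).mpr hm))]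
      exact ih (s ++ [x])

theorem get_uniques_eq (values : List String) :
    get_uniques values = PySem.Set.ofList values := by
  rw [PySem.Set.ofList_eq_foldl]
  exact get_uniques_fold values PySem.Set.empty

-- A's range-indexing loop over the unique list is the enumerate fold
theorem a_loop_eq (u : List String) :
    (PySem.List.pyRange 0 u.length 1).foldl
      (fun (d : PySem.Dict String Int) i => d.insert (PySem.List.pyGetD u i "") i)
      PySem.Dict.empty
    = (PySem.List.enumerate u 0).foldl
        (fun (d : PySem.Dict String Int) p => d.insert p.2 p.1) PySem.Dict.empty := by
  rw [PySem.List.enumerate_eq_map_pyRange u "", List.foldl_map]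
  simp [PySem.List.len]

-- B's backward overwrite loop: the surviving value for key k is the FIRST i in l with g i = k
theorem revfold_get? (g : Int → String) (l : List Int) (d : PySem.Dict String Int) (k : String) :
    (l.reverse.foldl (fun d i => d.insert (g i) i) d).get? k
      = match l.find? (fun i => g i == k) with
        | some i => some i
        | none => d.get? k := by
  induction l generalizing d with
  | nil => rfl
  | cons a t ih =>
    rw [List.reverse_cons, List.foldl_append, List.foldl_cons, List.foldl_nil,
      PySem.Dict.get?_insert, List.find?_cons]
    by_cases h : g a = k
    · simp [h]
    · have : (g a == k) = false := by simp [h]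
      rw [this, if_neg (fun hk => h hk.symm)]
      exact ih d

-- searching the index range left-to-right for the first position holding v IS list.index
theorem find_range_eq_index (xs : List String) (v : String) :
    (PySem.List.pyRange 0 (xs.length : Int)).find? (fun i => PySem.List.pyGetD xs i "" == v)
      = (PySem.List.index? xs v).map (fun k => (k : Int)) := by
  rw [PySem.List.pyRange_zero, List.find?_map]
  have h : ∀ (ys : List String),
      (List.range ys.length).find? (fun k => ys.getD k "" == v) = PySem.List.index? ys v := by
    intro ys
    induction ys with
    | nil => rfl
    | cons x t iht =>
      rw [List.length_cons, List.range_succ_eq_map, List.find?_cons]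
      by_cases hx : x = v
      · subst hx
        have := PySem.List.index?_cons_self x t
        simp only [PySem.List.index?_eq_idxOf?] at this
        simp [this]
      · have hb : ((x :: t).getD 0 "" == v) = false := by simp [hx]
        rw [hb, List.find?_map, PySem.List.index?_cons_of_ne t hx]
        have hp : ((fun k => (x :: t).getD k "" == v) ∘ Nat.succ)
            = (fun k => t.getD k "" == v) := by
          funext k
          simp [Function.comp]
        rw [hp, iht]
  have hc : ((fun i => PySem.List.pyGetD xs i "" == v) ∘ fun k : Nat => (k : Int))
      = (fun k : Nat => xs.getD k "" == v) := by
    funext k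
    simp [Function.comp, PySem.List.pyGetD_natCast]
  rw [Int.toNat_natCast, hc, h]
  cases PySem.List.index? xs v <;> rfl

-- the distinct values in first-occurrence order are strictly increasing under first-index
theorem ofList_pairwise_index (xs : List String) :
    (PySem.Set.ofList xs).Pairwise
      (fun a b => ((PySem.List.index? xs a).getD 0 : Nat) < (PySem.List.index? xs b).getD 0) := by
  induction xs using List.reverseRecOn with
  | nil => simp [PySem.Set.ofList]
  | append_singleton t x iht =>
    by_cases hx : x ∈ t
    · rw [PySem.Set.ofList_append_singleton, PySem.Set.add_of_mem
        (by exact (PySem.Set.mem_ofList t x).mpr hx)]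
      refine iht.imp_of_mem ?_
      intro a b ha hb hab
      rw [PySem.List.index?_append_of_mem [x] ((PySem.Set.mem_ofList t a).mp ha),
        PySem.List.index?_append_of_mem [x] ((PySem.Set.mem_ofList t b).mp hb)]
      exact hab
    · rw [PySem.Set.ofList_append_singleton, PySem.Set.add_of_not_mem
        (fun hm => hx ((PySem.Set.mem_ofList t x).mp hm))]
      rw [List.pairwise_append]
      refine ⟨?_, by simp, ?_⟩
      · refine iht.imp_of_mem ?_
        intro a b ha hb hab
        rw [PySem.List.index?_append_of_mem [x] ((PySem.Set.mem_ofList t a).mp ha),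
          PySem.List.index?_append_of_mem [x] ((PySem.Set.mem_ofList t b).mp hb)]
        exact hab
      · intro a ha b hb
        rw [List.mem_singleton] at hb
        subst hb
        have hat : a ∈ t := (PySem.Set.mem_ofList t a).mp ha
        rw [PySem.List.index?_append_of_mem [b] hat,
          PySem.List.index?_append_singleton_self t b hx]
        obtain ⟨k, hk⟩ : ∃ k, PySem.List.index? t a = some k := by
          cases hidx : PySem.List.index? t a with
          | none => exact absurd hat ((PySem.List.index?_eq_none_iff t a).mp hidx)
          | some k => exact ⟨k, rfl⟩
        obtain ⟨hlt, -, -⟩ := PySem.List.getElem_of_index?_eq_some hk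
        rw [hk]
        simpa using hlt

-- the index pairs of the deduplicated list, swapped, are exactly zip(uniques, range)
theorem enum_swap (u : List String) (s : Int) :
    (PySem.List.enumerate u s).map (fun p => (p.2, p.1))
      = u.zip (PySem.List.pyRange s (s + u.length)) := by
  induction u generalizing s with
  | nil => simp [PySem.List.enumerate, PySem.List.pyRange_one_eq_nil]
  | cons x t iht =>
    have hlen : s + ((x :: t).length : Int) = (s + 1) + (t.length : Int) := by
      simp only [List.length_cons]; push_cast; ring
    rw [hlen, PySem.List.enumerate_cons, List.map_cons,
      PySem.List.pyRange_one_cons (by omega), List.zip_cons_cons, iht (s + 1)]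

-- ===== VERDICT (by name: the statement is the Claim_ definition above) =====
theorem str_column_to_int_spec : Claim_equal_str_column_to_int := by
  intro dataset column _ _
  unfold Spec_str_column_to_int
  simp only [str_column_to_int, str_column_to_int_alt]
  set f : List String → String := fun row => PySem.List.pyGetD row column "" with hf
  set vals := dataset.map f with hvals
  -- rewrite B's loop body through the values list
  have hbody :
      ((PySem.List.pyRange 0 (dataset.length : Int) 1).reverse).foldl
        (fun (d : PySem.Dict String Int) i =>
          d.insert (PySem.List.pyGetD (PySem.List.pyGetD dataset i []) column "") i)
        PySem.Dict.empty
      = ((PySem.List.pyRange 0 (vals.length : Int) 1).reverse).foldl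
        (fun (d : PySem.Dict String Int) i => d.insert (PySem.List.pyGetD vals i "") i)
        PySem.Dict.empty := by
    rw [show (vals.length : Int) = (dataset.length : Int) by simp [hvals]]
    refine PySem.List.foldl_congr_mem _ _ _ _ ?_
    intro acc i _
    have h0 : f [] = "" := by simp [hf, PySem.List.pyGetD, PySem.List.pyGet?]
    have : PySem.List.pyGetD vals i "" = f (PySem.List.pyGetD dataset i []) := by
      rw [hvals, ← h0, PySem.List.pyGetD_map f dataset i []]
    rw [this]
  rw [hbody]
  set first : PySem.Dict String Int :=
    ((PySem.List.pyRange 0 (vals.length : Int) 1).reverse).foldl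
      (fun (d : PySem.Dict String Int) i => d.insert (PySem.List.pyGetD vals i "") i)
      PySem.Dict.empty with hfirst
  -- lookup in first = first-occurrence index
  have hget : ∀ v, first.get? v = (PySem.List.index? vals v).map (fun k => (k : Int)) := by
    intro v
    rw [hfirst, revfold_get? (fun i => PySem.List.pyGetD vals i "")]
    rw [find_range_eq_index vals v]
    cases PySem.List.index? vals v <;> simp [PySem.Dict.get?_empty]
  -- keys of first = the distinct values (in backward order)
  have hkeys_mem : ∀ v, v ∈ first.keys ↔ v ∈ vals := by
    intro v
    constructor
    · intro hv
      have := (PySem.Dict.contains_iff_mem_keys first v).mpr hv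
      rw [PySem.Dict.contains_eq_isSome_get?, hget v] at this
      cases hidx : PySem.List.index? vals v with
      | none => rw [hidx] at this; simp at this
      | some k =>
        obtain ⟨hk, hkv, -⟩ := PySem.List.getElem_of_index?_eq_some hidx
        exact hkv ▸ List.getElem_mem hk
    · intro hv
      have h1 : (PySem.List.index? vals v).isSome := (PySem.List.index?_isSome_iff vals v).mpr hv
      obtain ⟨k, hk⟩ := Option.isSome_iff_exists.mp h1
      have : (first.get? v).isSome := by rw [hget v, hk]; rfl
      exact (PySem.Dict.contains_iff_mem_keys first v).mp
        (by rw [PySem.Dict.contains_eq_isSome_get?]; exact this)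
  have hkeys_nodup : first.keys.Nodup := by
    rw [hfirst]
    exact PySem.Dict.nodup_keys_foldl_insert_key _ _ _ _ (by simp [PySem.Dict.keys_empty])
  -- sorting the keys by first index recovers first-occurrence order: the dedup of vals
  have horder : PySem.List.sorted first.keys (fun v => first.getD v 0) = PySem.Set.ofList vals := by
    refine PySem.List.sorted_eq_of_perm_of_pairwise_lt _ _ _ ?_ ?_
    · refine (List.perm_ext_iff_of_nodup (PySem.Set.nodup_ofList vals) hkeys_nodup).mpr ?_
      intro v
      rw [PySem.Set.mem_ofList, hkeys_mem]
    · refine (ofList_pairwise_index vals).imp_of_mem ?_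
      intro a b ha hb hab
      have hav : a ∈ vals := (PySem.Set.mem_ofList vals a).mp ha
      have hbv : b ∈ vals := (PySem.Set.mem_ofList vals b).mp hb
      obtain ⟨ka, hka⟩ : ∃ k, PySem.List.index? vals a = some k := by
        cases h : PySem.List.index? vals a with
        | none => exact absurd hav ((PySem.List.index?_eq_none_iff vals a).mp h)
        | some k => exact ⟨k, rfl⟩
      obtain ⟨kb, hkb⟩ : ∃ k, PySem.List.index? vals b = some k := by
        cases h : PySem.List.index? vals b with
        | none => exact absurd hbv ((PySem.List.index?_eq_none_iff vals b).mp h)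
        | some k => exact ⟨k, rfl⟩
      have hga : first.getD a 0 = (ka : Int) :=
        PySem.Dict.getD_of_get?_eq_some first 0 (by rw [hget a, hka]; rfl)
      have hgb : first.getD b 0 = (kb : Int) :=
        PySem.Dict.getD_of_get?_eq_some first 0 (by rw [hget b, hkb]; rfl)
      rw [hga, hgb]
      rw [hka, hkb] at hab
      simp only [Option.getD_some] at hab
      exact_mod_cast hab
  rw [horder]
  set u := PySem.Set.ofList vals with hu
  have hund : u.Nodup := PySem.Set.nodup_ofList vals
  -- A's side: items of the enumerate fold
  rw [get_uniques_eq, ← hu, a_loop_eq u]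
  have hA : ((PySem.List.enumerate u 0).foldl
      (fun (d : PySem.Dict String Int) p => d.insert p.2 p.1) PySem.Dict.empty).items
      = (PySem.List.enumerate u 0).map (fun p => (p.2, p.1)) := by
    rw [PySem.Dict.items_foldl_insert_fresh (PySem.List.enumerate u 0)
      (fun p => p.2) (fun p => p.1) PySem.Dict.empty
      (fun a _ => PySem.Dict.contains_empty a.2)
      (by rw [PySem.List.map_snd_enumerate]; exact hund)]
    rfl
  -- B's side: items of dict(zip(u, range(len(u))))
  have hB : (PySem.Dict.ofList (u.zip (PySem.List.pyRange 0 (u.length : Int) 1))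
      : PySem.Dict String Int).items = u.zip (PySem.List.pyRange 0 (u.length : Int) 1) := by
    have hlen : u.length ≤ (PySem.List.pyRange 0 (u.length : Int) 1).length := by
      rw [PySem.List.length_pyRange_one]; omega
    have hfst : (u.zip (PySem.List.pyRange 0 (u.length : Int) 1)).map Prod.fst = u :=
      List.map_fst_zip hlen
    rw [PySem.Dict.ofList, PySem.Dict.update,
      PySem.Dict.items_foldl_insert_fresh (u.zip (PySem.List.pyRange 0 (u.length : Int) 1))
        Prod.fst Prod.snd PySem.Dict.empty
        (fun a _ => PySem.Dict.contains_empty a.1) (by rw [hfst]; exact hund)]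
    simp
    rfl
  rw [hA, hB]
  have := enum_swap u 0
  rw [zero_add] at this
  exact this
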